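-- pv_equiv track=rewrite | github.com/EyeCon-AAAD/EyeTrackingExperiment | utils.py | grid2point
-- ===== SOURCE A (Python) =====
-- def grid2point(predicted, xd, yd, width= 1920, heigth = 1080):
--     grid = -1
--     xstep = width // xd
--     ystep = heigth // yd
--
--     initx =  xstep//2
--     inity =  ystep//2
--
--     for i in range(yd):
--         y = inity + i * ystep
--         for j in range(xd):
--             grid += 1
--             x = initx + j * xstep
--             if predicted == grid:
--                 return [x, y]
-- ===== SOURCE B (Python) =====
-- def grid2point(predicted, xd, yd, width= 1920, heigth = 1080):
--     xstep = width // xd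
--     ystep = heigth // yd
--     if xd > 0 and yd > 0 and 0 <= predicted < xd * yd:
--         row, col = divmod(predicted, xd)
--         return [xstep // 2 + col * xstep, ystep // 2 + row * ystep]
--     return None
-- ===== Notes on version B (the rewrite author's own statement) =====
-- stated objective: faster
-- what changed: Replaced the nested row/column scan counting grid cells until the predicted index is reached by O(1) index arithmetic (row = predicted // xd, col = predicted % xd) with an explicit bounds check.
import Mathlib
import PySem

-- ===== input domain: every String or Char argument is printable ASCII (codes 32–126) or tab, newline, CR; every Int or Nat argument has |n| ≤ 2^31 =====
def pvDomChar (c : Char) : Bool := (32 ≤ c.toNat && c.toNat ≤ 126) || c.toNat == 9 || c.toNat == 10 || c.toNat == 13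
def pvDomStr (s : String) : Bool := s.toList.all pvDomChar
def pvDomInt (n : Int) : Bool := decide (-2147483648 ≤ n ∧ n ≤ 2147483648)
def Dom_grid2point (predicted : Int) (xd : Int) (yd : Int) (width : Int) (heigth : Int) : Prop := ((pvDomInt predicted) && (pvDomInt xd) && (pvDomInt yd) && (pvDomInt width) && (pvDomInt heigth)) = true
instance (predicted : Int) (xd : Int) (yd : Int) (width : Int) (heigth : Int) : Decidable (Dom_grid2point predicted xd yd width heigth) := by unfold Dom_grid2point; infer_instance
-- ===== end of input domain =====

-- B replaces A's nested row/column scan by O(1) index arithmetic (row = predicted // xd, col = predicted % xd) with a bounds check.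

-- ===== PORT A =====
-- inner loop body: `for j in range(xd): grid += 1; x = ...; if predicted == grid: return [x, y]`
-- (early return modelled by carrying the state (grid, result) and skipping once result is some)
def pvAInner (predicted initx xstep y : Int) (st : Int × Option (List Int)) (j : Int) : Int × Option (List Int) :=
  match st.2 with
  | some _ => st
  | none =>
    let grid := st.1 + 1
    let x := initx + j * xstep
    if predicted == grid then (grid, some [x, y]) else (grid, none)

-- outer loop body: `for i in range(yd): y = inity + i * ystep; <inner loop>`
def pvAOuter (predicted xd initx inity xstep ystep : Int) (st : Int × Option (List Int)) (i : Int) : Int × Option (List Int) :=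
  match st.2 with
  | some _ => st
  | none =>
    let y := inity + i * ystep
    (PySem.List.pyRange 0 xd 1).foldl (pvAInner predicted initx xstep y) st

def grid2point (predicted : Int) (xd : Int) (yd : Int) (width : Int) (heigth : Int) : Option (List Int) :=
  let xstep := PySem.Int.floordiv width xd
  let ystep := PySem.Int.floordiv heigth yd
  let initx := PySem.Int.floordiv xstep 2
  let inity := PySem.Int.floordiv ystep 2
  ((PySem.List.pyRange 0 yd 1).foldl (pvAOuter predicted xd initx inity xstep ystep)
    ((-1 : Int), (none : Option (List Int)))).2

-- ===== PORT B =====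
def grid2point_alt (predicted : Int) (xd : Int) (yd : Int) (width : Int) (heigth : Int) : Option (List Int) :=
  let xstep := PySem.Int.floordiv width xd
  let ystep := PySem.Int.floordiv heigth yd
  if 0 < xd ∧ 0 < yd ∧ 0 ≤ predicted ∧ predicted < xd * yd then
    let row := PySem.Int.floordiv predicted xd
    let col := PySem.Int.mod predicted xd
    some [PySem.Int.floordiv xstep 2 + col * xstep, PySem.Int.floordiv ystep 2 + row * ystep]
  else none

-- ===== PRECONDITION & SPEC =====
-- Python A raises ZeroDivisionError when xd = 0 or yd = 0 (width // xd, heigth // yd); excluded here.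
def Pre_grid2point (predicted : Int) (xd : Int) (yd : Int) (width : Int) (heigth : Int) : Prop :=
  xd ≠ 0 ∧ yd ≠ 0
instance (predicted : Int) (xd : Int) (yd : Int) (width : Int) (heigth : Int) : Decidable (Pre_grid2point predicted xd yd width heigth) := by unfold Pre_grid2point; infer_instance

def pvWitness_grid2point : Int × Int × Int × Int × Int := (5, 3, 3, 1920, 1080)

def Spec_grid2point (predicted : Int) (xd : Int) (yd : Int) (width : Int) (heigth : Int) (out : Option (List Int)) : Prop := out = grid2point_alt predicted xd yd width heigth
instance (predicted : Int) (xd : Int) (yd : Int) (width : Int) (heigth : Int) (out : Option (List Int)) : Decidable (Spec_grid2point predicted xd yd width heigth out) := by unfold Spec_grid2point; infer_instance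

-- ===== CLAIM (what is proved, stated in full; the proofs are below) =====
def Claim_equal_grid2point : Prop := ∀ (predicted : Int) (xd : Int) (yd : Int) (width : Int) (heigth : Int), Dom_grid2point predicted xd yd width heigth → Pre_grid2point predicted xd yd width heigth → Spec_grid2point predicted xd yd width heigth (grid2point predicted xd yd width heigth)

-- ===== LEMMAS AND PROOFS =====

-- characterisation of the inner loop starting at counter g with no result yet
lemma inner_spec (p ix xs y : Int) (b : Int) (hb : 0 ≤ b) : ∀ g : Int,
    List.foldl (pvAInner p ix xs y) (g, none) (PySem.List.pyRange 0 b 1) =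
      if g < p ∧ p ≤ g + b then (p, some [ix + (p - g - 1) * xs, y])
      else (g + b, none) := by
  induction b, hb using Int.le_induction with
  | base =>
    intro g
    rw [PySem.List.pyRange_one_eq_nil (by omega)]
    simp only [List.foldl_nil]
    rw [if_neg (by omega)]
    norm_num
  | succ n hn ih =>
    intro g
    rw [PySem.List.pyRange_one_succ_right (by omega), List.foldl_append, ih]
    by_cases h : g < p ∧ p ≤ g + n
    · rw [if_pos h]
      simp only [List.foldl_cons, List.foldl_nil, pvAInner]
      rw [if_pos (by omega)]
    · rw [if_neg h]
      simp only [List.foldl_cons, List.foldl_nil, pvAInner, beq_iff_eq]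
      by_cases hp : p = g + n + 1
      · rw [if_pos (by omega), if_pos (by omega)]
        subst hp
        have h1 : g + n + 1 - g - 1 = n := by ring
        rw [h1]
      · rw [if_neg (by omega), if_neg (by omega)]
        refine Prod.ext (by omega) rfl

-- with a nonpositive xd the inner range is empty, so the outer fold never changes the state
lemma outer_frozen_of_xd_nonpos (p xd ix iy xs ys : Int) (hxd : xd ≤ 0) (l : List Int)
    (g : Int) :
    List.foldl (pvAOuter p xd ix iy xs ys) (g, none) l = (g, none) := by
  induction l with
  | nil => rfl
  | cons a t ih =>
    simp only [List.foldl_cons, pvAOuter, PySem.List.pyRange_one_eq_nil hxd, List.foldl_nil]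
    exact ih

-- characterisation of the full outer loop for a positive xd
lemma outer_spec (p xd ix iy xs ys : Int) (hxd : 0 < xd) (b : Int) (hb : 0 ≤ b) :
    List.foldl (pvAOuter p xd ix iy xs ys) ((-1 : Int), none) (PySem.List.pyRange 0 b 1) =
      if 0 ≤ p ∧ p < b * xd then
        (p, some [ix + (PySem.Int.mod p xd) * xs, iy + (PySem.Int.floordiv p xd) * ys])
      else (b * xd - 1, none) := by
  induction b, hb using Int.le_induction with
  | base =>
    rw [PySem.List.pyRange_one_eq_nil (by omega)]
    simp only [List.foldl_nil]
    rw [if_neg (by omega)]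
    norm_num
  | succ m hm ih =>
    have hmul : (m + 1) * xd = m * xd + xd := by ring
    rw [PySem.List.pyRange_one_succ_right (by omega), List.foldl_append, ih]
    by_cases h : 0 ≤ p ∧ p < m * xd
    · rw [if_pos h]
      simp only [List.foldl_cons, List.foldl_nil]
      have : pvAOuter p xd ix iy xs ys
          (p, some [ix + PySem.Int.mod p xd * xs, iy + PySem.Int.floordiv p xd * ys]) m =
          (p, some [ix + PySem.Int.mod p xd * xs, iy + PySem.Int.floordiv p xd * ys]) := rfl
      rw [this, if_pos ⟨h.1, by nlinarith [h.2]⟩]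
    · rw [if_neg h]
      simp only [List.foldl_cons, List.foldl_nil, pvAOuter]
      rw [inner_spec p ix xs _ xd (by omega)]
      by_cases hp : m * xd ≤ p ∧ p < m * xd + xd
      · rw [if_pos (by omega)]
        have hfd : PySem.Int.floordiv p xd = m :=
          (PySem.Int.floordiv_eq_iff_of_pos hxd).mpr ⟨hp.1, by rw [hmul]; exact hp.2⟩
        have hmd : PySem.Int.mod p xd = p - m * xd := by
          have := PySem.Int.floordiv_mul_add_mod p xd
          rw [hfd] at this; omega
        have hnn : 0 ≤ m * xd := by positivity
        rw [if_pos ⟨by omega, by rw [hmul]; omega⟩, hfd, hmd]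
        have h1 : p - (m * xd - 1) - 1 = p - m * xd := by ring
        rw [h1]
      · rw [if_neg (by omega), if_neg (by rw [hmul]; omega)]
        refine Prod.ext (by rw [hmul]; omega) rfl

-- ===== VERDICT (by name: the statement is the Claim_ definition above) =====
theorem grid2point_spec : Claim_equal_grid2point := by
  intro p xd yd w h _ _
  unfold Spec_grid2point
  simp only [grid2point, grid2point_alt]
  by_cases hxd : 0 < xd
  · by_cases hyd : 0 < yd
    · rw [outer_spec _ _ _ _ _ _ hxd yd (by omega)]
      by_cases hr : 0 ≤ p ∧ p < yd * xd
      · rw [if_pos hr, if_pos ⟨hxd, hyd, hr.1, by rw [mul_comm]; exact hr.2⟩]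
      · rw [if_neg hr, if_neg (by
          rintro ⟨_, _, h1, h2⟩
          exact hr ⟨h1, by rw [mul_comm]; exact h2⟩)]
    · rw [PySem.List.pyRange_one_eq_nil (by omega),
          if_neg (by rintro ⟨_, h2, _⟩; omega)]
      rfl
  · rw [if_neg (by rintro ⟨h1, _⟩; omega),
        outer_frozen_of_xd_nonpos _ _ _ _ _ _ (by omega)]
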